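-- pv_equiv track=rewrite | github.com/fabriceHategekimana/projet | travail/2e_semestre/datamining/tps/tp0/python/exercice2.py | count_transitions_for
-- ===== SOURCE A (Python) =====
-- def count_transitions_for(x):
--     count = 0
--     last= None
--     for i in range(len(x)):
--         if x[i] == False:
--             last= False
--         else:
--             if last == False:
--                 count= count+1
--             last= True
--     return count
-- ===== SOURCE B (Python) =====
-- def count_transitions_for(x):
--     # pairwise scan: a False immediately followed by a True is one transition
--     return sum(1 for a, b in zip(x, x[1:]) if a == False and b != False)
-- ===== Notes on version B (the rewrite author's own statement) =====
-- stated objective: simpler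
-- what changed: Replaces the indexed loop with last-state tracking by a single pairwise zip of the list with its tail, counting (False, True) adjacent pairs.
import Mathlib
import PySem

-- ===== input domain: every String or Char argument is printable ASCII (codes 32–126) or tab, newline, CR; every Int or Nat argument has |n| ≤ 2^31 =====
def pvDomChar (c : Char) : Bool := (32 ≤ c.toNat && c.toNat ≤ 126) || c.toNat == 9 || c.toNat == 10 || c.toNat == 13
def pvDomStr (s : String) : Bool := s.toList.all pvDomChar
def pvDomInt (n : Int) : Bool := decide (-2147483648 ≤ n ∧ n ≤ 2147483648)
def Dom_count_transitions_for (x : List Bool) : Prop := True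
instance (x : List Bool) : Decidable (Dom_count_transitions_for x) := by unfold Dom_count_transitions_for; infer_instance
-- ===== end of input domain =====

-- B replaces the indexed last-state loop by a pairwise zip count; objective: simpler.
-- ===== PORT A =====
def count_transitions_for (x : List Bool) : Int :=
  ((PySem.List.pyRange 0 (x.length : Int) 1).foldl
    (fun (s : Int × Option Bool) i =>
      if PySem.List.pyGetD x i false == false then (s.1, some false)
      else ((if s.2 == some false then s.1 + 1 else s.1), some true))
    (0, none)).1

-- ===== PORT B =====
def count_transitions_for_alt (x : List Bool) : Int :=
  (((x.zip (PySem.List.slice x (some 1) none)).filter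
      (fun p => p.1 == false && !(p.2 == false))).length : Int)

-- ===== PRECONDITION & SPEC =====
def Spec_count_transitions_for (x : List Bool) (out : Int) : Prop := out = count_transitions_for_alt x
instance (x : List Bool) (out : Int) : Decidable (Spec_count_transitions_for x out) := by unfold Spec_count_transitions_for; infer_instance

-- ===== CLAIM (what is proved, stated in full; the proofs are below) =====
def Claim_equal_count_transitions_for : Prop := ∀ (x : List Bool), Dom_count_transitions_for x → Spec_count_transitions_for x (count_transitions_for x)

-- ===== LEMMAS AND PROOFS =====

-- ===== VERDICT (by name: the statement is the Claim_ definition above) =====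
-- loop step of port A, named so lemmas can cite it
def pvStep (s : Int × Option Bool) (xi : Bool) : Int × Option Bool :=
  if xi == false then (s.1, some false)
  else ((if s.2 == some false then s.1 + 1 else s.1), some true)

-- B's count as a function of the list (unfolding slice to tail)
def pvPairs (x : List Bool) : Int :=
  (((x.zip x.tail).filter (fun p => p.1 == false && !(p.2 == false))).length : Int)

lemma slice_one_eq_tail (x : List Bool) : PySem.List.slice x (some 1) none = x.tail := by
  have := PySem.List.slice_from (xs := x) (a := 1)
  simpa [List.drop_one] using this

lemma alt_eq_pairs (x : List Bool) : count_transitions_for_alt x = pvPairs x := by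
  simp [count_transitions_for_alt, pvPairs, slice_one_eq_tail]

lemma pairs_cons (a b : Bool) (t : List Bool) :
    pvPairs (a :: b :: t) = (if a == false && !(b == false) then 1 else 0) + pvPairs (b :: t) := by
  simp [pvPairs]
  split_ifs with h <;> simp [h] <;> omega

-- invariant of A's fold: starting from count c and last state l
lemma fold_inv (x : List Bool) : ∀ (c : Int) (l : Option Bool),
    (x.foldl pvStep (c, l)).1 =
      c + (match x with
           | [] => 0
           | h :: _ => if l == some false && !(h == false) then 1 else 0)
        + pvPairs x := by
  induction x with
  | nil => intro c l; simp [pvPairs]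
  | cons h t ih =>
    intro c l
    cases t with
    | nil =>
      rcases l with _ | (_|_) <;> cases h <;> simp [pvStep, pvPairs]
    | cons h2 t2 =>
      have step : (h :: h2 :: t2).foldl pvStep (c, l) =
          (h2 :: t2).foldl pvStep (pvStep (c, l) h) := by simp
      rw [step, ih, pairs_cons]
      rcases l with _ | (_|_) <;> cases h <;> cases h2 <;>
        simp [pvStep] <;> omega

lemma a_eq_fold (x : List Bool) :
    count_transitions_for x = (x.foldl pvStep ((0 : Int), (none : Option Bool))).1 := by
  unfold count_transitions_for
  have hfun : (fun (s : Int × Option Bool) (i : Int) =>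
      if PySem.List.pyGetD x i false == false then (s.1, some false)
      else ((if s.2 == some false then s.1 + 1 else s.1), some true)) =
      (fun (s : Int × Option Bool) (i : Int) => pvStep s (PySem.List.pyGetD x i false)) := by
    funext s i; simp [pvStep]
  rw [hfun, PySem.List.foldl_pyRange_zero_pyGetD' (f := pvStep) (xs := x) (d := false)
      (init := ((0 : Int), (none : Option Bool)))]

-- ===== VERDICT =====
theorem count_transitions_for_spec : Claim_equal_count_transitions_for := by
  intro x _
  unfold Spec_count_transitions_for
  rw [a_eq_fold, fold_inv, alt_eq_pairs]
  cases x <;> simp
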